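-- pv_equiv track=rewrite | github.com/Yuxiang-Huang/python | dict.py | song_common_words
-- ===== SOURCE A (Python) =====
-- def song_common_words(lyrics, commons):
--     words = lyrics.split()
--     freqs = {}
--     for word in words:
--         if word in commons:
--             if word in freqs:
--                 freqs[word]+= 1
--             else:
--                 freqs[word] = 1
--     return freqs
-- ===== SOURCE B (Python) =====
-- def song_common_words(lyrics, commons):
--     def go(ws):
--         if not ws:
--             return {}
--         w = ws[0]
--         res = {w: ws.count(w)}
--         res.update(go([x for x in ws[1:] if x != w]))
--         return res
--     return go([w for w in lyrics.split() if w in commons])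
-- ===== Notes on version B (the rewrite author's own statement) =====
-- stated objective: alternative
-- what changed: Replaces A's single-pass dict-increment loop by a recursive head-count-and-eliminate scheme: filter the matching words once, then recursively take the first word, count all its occurrences at once, delete them from the rest, and recurse on the shrunken list.
import Mathlib
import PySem

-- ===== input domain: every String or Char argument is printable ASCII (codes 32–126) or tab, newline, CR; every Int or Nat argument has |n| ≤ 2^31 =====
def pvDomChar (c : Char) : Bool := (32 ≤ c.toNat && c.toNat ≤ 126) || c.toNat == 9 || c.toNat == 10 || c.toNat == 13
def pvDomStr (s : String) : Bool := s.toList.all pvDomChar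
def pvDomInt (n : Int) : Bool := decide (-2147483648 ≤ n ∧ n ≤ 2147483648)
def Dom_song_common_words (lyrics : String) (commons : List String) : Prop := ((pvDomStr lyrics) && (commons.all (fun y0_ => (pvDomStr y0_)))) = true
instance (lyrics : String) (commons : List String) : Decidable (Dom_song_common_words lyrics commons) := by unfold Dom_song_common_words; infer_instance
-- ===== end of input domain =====

-- B replaces A's single-pass dict-increment loop by a recursive head-count-and-eliminate scheme over the filtered word list (alternative decomposition, same results).

-- ===== PORT A =====
def song_common_words (lyrics : String) (commons : List String) : List (String × Int) :=
  ((PySem.Str.split₀ lyrics).foldl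
    (fun freqs word =>
      if word ∈ commons then
        if freqs.contains word then
          freqs.insert word (freqs.getD word 0 + 1)
        else
          freqs.insert word 1
      else freqs)
    PySem.Dict.empty).items

-- ===== PORT B =====
-- B's inner 'go': take the head word, count all its occurrences, remove them, recurse.
def pvGo : List String → List (String × Int)
  | [] => []
  | w :: ws =>
      (w, ((w :: ws).count w : Int)) :: pvGo (ws.filter (fun x => x ≠ w))
termination_by l => l.length
decreasing_by
  have h := List.length_filter_le (fun x : {x // x ∈ ws} => decide (x.1 ≠ w)) ws.attach
  simp at h ⊢
  omega

def song_common_words_alt (lyrics : String) (commons : List String) : List (String × Int) :=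
  pvGo ((PySem.Str.split₀ lyrics).filter (fun w => w ∈ commons))

-- ===== PRECONDITION & SPEC =====
def Spec_song_common_words (lyrics : String) (commons : List String) (out : List (String × Int)) : Prop := out = song_common_words_alt lyrics commons
instance (lyrics : String) (commons : List String) (out : List (String × Int)) : Decidable (Spec_song_common_words lyrics commons out) := by unfold Spec_song_common_words; infer_instance

-- ===== CLAIM (what is proved, stated in full; the proofs are below) =====
def Claim_equal_song_common_words : Prop := ∀ (lyrics : String) (commons : List String), Dom_song_common_words lyrics commons → Spec_song_common_words lyrics commons (song_common_words lyrics commons)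

-- ===== LEMMAS AND PROOFS =====

-- A's branched update is the counter update: when the key is absent getD gives 0.
lemma branch_eq_counter_step (d : PySem.Dict String Int) (w : String) :
    (if d.contains w then d.insert w (d.getD w 0 + 1) else d.insert w 1) =
    d.insert w (d.getD w 0 + 1) := by
  by_cases h : d.contains w = true
  · simp [h]
  · have hn : d.get? w = none := by
      rw [PySem.Dict.get?_eq_none_iff_contains]
      simpa using h
    simp [h, PySem.Dict.getD, hn]

-- A's whole loop is the counter-building fold over the filtered word list.
lemma foldl_eq_counter_fold (commons : List String) :
    ∀ (l : List String) (d : PySem.Dict String Int),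
    l.foldl
      (fun freqs word =>
        if word ∈ commons then
          if freqs.contains word then freqs.insert word (freqs.getD word 0 + 1)
          else freqs.insert word 1
        else freqs) d
    = (l.filter (fun w => w ∈ commons)).foldl
        (fun freqs word => freqs.insert word (freqs.getD word 0 + 1)) d := by
  intro l
  induction l with
  | nil => intro d; rfl
  | cons x xs ih =>
    intro d
    by_cases hx : x ∈ commons
    · simp only [List.foldl_cons, List.filter_cons, hx, decide_true, if_true]
      rw [branch_eq_counter_step]
      exact ih _
    · simp only [List.foldl_cons, List.filter_cons, hx, decide_false,
        if_false, Bool.false_eq_true]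
      exact ih _

-- Folding Set.add from an accumulator already containing x ignores every x in the list.
lemma foldl_add_skip (x : String) :
    ∀ (ws : List String) (acc : PySem.Set String), x ∈ acc →
    ws.foldl PySem.Set.add acc = (ws.filter (fun y => y ≠ x)).foldl PySem.Set.add acc := by
  intro ws
  induction ws with
  | nil => intro acc _; rfl
  | cons y ys ih =>
    intro acc hx
    by_cases hy : y = x
    · subst hy
      have hadd : PySem.Set.add acc y = acc := by
        simp [PySem.Set.add, List.contains_eq_mem, hx]
      simp only [List.foldl_cons, List.filter_cons, decide_not, hadd]
      simp only [decide_true, Bool.not_true, Bool.false_eq_true, if_false]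
      simpa using ih acc hx
    · have hmem : x ∈ PySem.Set.add acc y := by
        simp [PySem.Set.add]
        split <;> simp [hx]
      simp only [List.foldl_cons, List.filter_cons, decide_not]
      rw [if_pos (by simpa using hy)]
      simp only [List.foldl_cons]
      simpa using ih _ hmem

-- A head the list never mentions again stays at the front of the Set.add fold.
lemma foldl_add_head (w : String) :
    ∀ (l : List String) (acc : List String), (∀ y ∈ l, y ≠ w) →
    l.foldl PySem.Set.add (w :: acc) = w :: l.foldl PySem.Set.add acc := by
  intro l
  induction l with
  | nil => intro acc _; rfl
  | cons a l ih =>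
    intro acc h
    have haw : a ≠ w := h a (by simp)
    have hstep : PySem.Set.add (w :: acc) a = w :: PySem.Set.add acc a := by
      simp [PySem.Set.add, List.contains_eq_mem, haw]
      split <;> simp
    simp only [List.foldl_cons, hstep]
    exact ih _ (fun y hy => h y (by simp [hy]))

-- First-occurrence dedup of a cons: head, then dedup of the tail purged of the head.
lemma ofList_cons_purge (w : String) (ws : List String) :
    PySem.Set.ofList (w :: ws) = w :: PySem.Set.ofList (ws.filter (fun y => y ≠ w)) := by
  have h0 : PySem.Set.ofList (w :: ws) = ws.foldl PySem.Set.add [w] := by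
    simp [PySem.Set.ofList, PySem.Set.add, PySem.Set.empty]
  rw [h0, foldl_add_skip w ws [w] (by simp)]
  rw [foldl_add_head w _ [] (by intro y hy; simp at hy; exact hy.2)]
  rfl

-- pvGo computes the counter items of its argument.
lemma pvGo_eq_counter_items_aux :
    ∀ (n : Nat) (l : List String), l.length ≤ n →
    pvGo l = (PySem.Set.ofList l).map (fun k => (k, (l.count k : Int))) := by
  intro n
  induction n with
  | zero =>
    intro l hl
    have : l = [] := List.length_eq_zero_iff.mp (Nat.le_zero.mp hl)
    subst this
    simp [pvGo, PySem.Set.ofList, PySem.Set.empty]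
  | succ n ih =>
    intro l hl
    cases l with
    | nil => simp [pvGo, PySem.Set.ofList, PySem.Set.empty]
    | cons w ws =>
      have hlen : (ws.filter (fun x => x ≠ w)).length ≤ n := by
        have := List.length_filter_le (fun x => decide (x ≠ w)) ws
        simp at hl
        omega
      rw [pvGo, ofList_cons_purge, List.map_cons, ih _ hlen]
      congr 1
      apply List.map_congr_left
      intro v hv
      have h := hv
      rw [PySem.Set.mem_ofList] at h
      have hvw : v ≠ w := by
        simp at h
        exact h.2
      have hc : (ws.filter (fun x => !decide (x = w))).count v = ws.count v := by
        rw [List.count_filter]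
        simp [hvw]
      simp [hc, Ne.symm hvw]

lemma pvGo_eq_counter_items (l : List String) :
    pvGo l = (PySem.Set.ofList l).map (fun k => (k, (l.count k : Int))) :=
  pvGo_eq_counter_items_aux l.length l (Nat.le_refl _)

-- ===== VERDICT (by name: the statement is the Claim_ definition above) =====
theorem song_common_words_spec : Claim_equal_song_common_words := by
  intro lyrics commons _
  unfold Spec_song_common_words song_common_words song_common_words_alt
  rw [foldl_eq_counter_fold, PySem.Dict.foldl_insert_getD_add_one_eq_counter,
      PySem.Dict.items_counter, pvGo_eq_counter_items]
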